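-- pv_equiv track=rewrite | github.com/li-1o/ball-python-calc | app2.py | get_gametes
-- ===== SOURCE A (Python) =====
-- import itertools
--
-- def get_gametes(genotype_dict):
--     gene_options = []
--     gene_ids = sorted(genotype_dict.keys())
--     for gene in gene_ids:
--         score = genotype_dict[gene]
--         if score == 2: options = [1]
--         elif score == 1: options = [0, 1]
--         else: options = [0]
--         gene_options.append([(gene, val) for val in options])
--     return list(itertools.product(*gene_options))
-- ===== SOURCE B (Python) =====
-- def get_gametes(genotype_dict):
--     def rec(keys):
--         if not keys:
--             return [()]
--         gene = keys[0]
--         score = genotype_dict[gene]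
--         if score == 2: options = [1]
--         elif score == 1: options = [0, 1]
--         else: options = [0]
--         rest = rec(keys[1:])
--         return [((gene, v),) + t for v in options for t in rest]
--     return rec(sorted(genotype_dict.keys()))
-- ===== Notes on version B (the rewrite author's own statement) =====
-- stated objective: alternative
-- what changed: Replaces itertools.product over a prebuilt list of per-gene option pools with a direct recursion on the sorted key list that builds the tuples front-to-back (options outer, recursive tails inner).
import Mathlib
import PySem

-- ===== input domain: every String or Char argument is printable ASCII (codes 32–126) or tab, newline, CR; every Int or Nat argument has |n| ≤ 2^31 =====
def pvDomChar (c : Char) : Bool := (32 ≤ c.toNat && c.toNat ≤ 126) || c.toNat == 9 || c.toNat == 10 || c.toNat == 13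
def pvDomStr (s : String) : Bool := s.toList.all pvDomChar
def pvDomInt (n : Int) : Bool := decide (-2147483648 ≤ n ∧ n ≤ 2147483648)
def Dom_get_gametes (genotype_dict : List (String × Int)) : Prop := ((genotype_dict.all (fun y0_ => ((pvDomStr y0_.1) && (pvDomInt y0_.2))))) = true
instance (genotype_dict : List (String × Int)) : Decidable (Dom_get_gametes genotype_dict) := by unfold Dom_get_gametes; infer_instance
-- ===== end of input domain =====

-- B replaces itertools.product over prebuilt option pools with a direct recursion on the
-- sorted key list (alternative decomposition; same output, same order).

-- ===== PORT A =====
-- score -> options  (the if/elif/else chain of A)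
def ggOptionsA (score : Int) : List Int :=
  if score = 2 then [1] else if score = 1 then [0, 1] else [0]

-- list(itertools.product(*pools)) ported step for step as its documented loop:
-- result = [[]]; for pool in pools: result = [t + [x] for t in result for x in pool]
def ggProduct (pools : List (List (String × Int))) : List (List (String × Int)) :=
  pools.foldl (fun result pool => result.flatMap (fun t => pool.map (fun x => t ++ [x]))) [[]]

def get_gametes (genotype_dict : List (String × Int)) : List (List (String × Int)) :=
  let d := PySem.Dict.ofList genotype_dict
  let gene_ids := PySem.List.sorted d.keys (fun x => x) false
  let gene_options := gene_ids.foldl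
    (fun acc gene => acc ++ [(ggOptionsA (d.getD gene 0)).map (fun val => (gene, val))]) []
  ggProduct gene_options

-- ===== PORT B =====
-- score -> options  (the if/elif/else chain of B)
def ggOptionsB (score : Int) : List Int :=
  if score = 2 then [1] else if score = 1 then [0, 1] else [0]

-- rec(keys): recursion on the sorted key list, options outer, recursive tails inner
def ggRec (d : PySem.Dict String Int) : List String → List (List (String × Int))
  | [] => [[]]
  | gene :: rest_keys =>
      let rest := ggRec d rest_keys
      (ggOptionsB (d.getD gene 0)).flatMap (fun v => rest.map (fun t => (gene, v) :: t))

def get_gametes_alt (genotype_dict : List (String × Int)) : List (List (String × Int)) :=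
  let d := PySem.Dict.ofList genotype_dict
  ggRec d (PySem.List.sorted d.keys (fun x => x) false)

-- ===== PRECONDITION & SPEC =====
def Spec_get_gametes (genotype_dict : List (String × Int)) (out : List (List (String × Int))) : Prop := out = get_gametes_alt genotype_dict
instance (genotype_dict : List (String × Int)) (out : List (List (String × Int))) : Decidable (Spec_get_gametes genotype_dict out) := by unfold Spec_get_gametes; infer_instance

-- ===== CLAIM (what is proved, stated in full; the proofs are below) =====
def Claim_equal_get_gametes : Prop := ∀ (genotype_dict : List (String × Int)), Dom_get_gametes genotype_dict → Spec_get_gametes genotype_dict (get_gametes genotype_dict)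

-- ===== LEMMAS AND PROOFS =====

-- A's product loop, run from any accumulator, appends every product tuple behind every
-- accumulated prefix; with acc = [[]] this is exactly B's recursion on the pool list.
lemma ggProduct_foldl_eq (pools : List (List (String × Int)))
    (acc : List (List (String × Int))) :
    pools.foldl (fun result pool => result.flatMap (fun t => pool.map (fun x => t ++ [x]))) acc
      = acc.flatMap (fun t =>
          (pools.foldr (fun pool rest => pool.flatMap (fun x => rest.map (fun u => x :: u))) [[]]).map
            (fun u => t ++ u)) := by
  induction pools generalizing acc with
  | nil => simp
  | cons pool pools ih =>
      simp only [List.foldl_cons, List.foldr_cons, ih, List.flatMap_assoc]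
      refine List.flatMap_congr (fun t _ => ?_)
      simp [List.map_flatMap, List.flatMap_map, List.map_map, Function.comp_def,
        List.append_assoc]

lemma ggRec_eq_foldr (d : PySem.Dict String Int) (keys : List String) :
    ggRec d keys
      = (keys.map (fun gene => (ggOptionsA (d.getD gene 0)).map (fun val => (gene, val)))).foldr
          (fun pool rest => pool.flatMap (fun x => rest.map (fun u => x :: u))) [[]] := by
  induction keys with
  | nil => rfl
  | cons g ks ih =>
      simp only [ggRec, List.map_cons, List.foldr_cons, ← ih, List.flatMap_map]
      rfl

-- ===== VERDICT (by name: the statement is the Claim_ definition above) =====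
theorem get_gametes_spec : Claim_equal_get_gametes := by
  intro gd _
  show get_gametes gd = get_gametes_alt gd
  simp only [get_gametes, get_gametes_alt, ggProduct]
  rw [PySem.List.foldl_append_singleton_eq_map, List.nil_append,
    ggProduct_foldl_eq, ggRec_eq_foldr]
  simp
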